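-- pv_equiv track=rewrite | github.com/UmerVarya/Spot-Ai-Agent | dashboard.py | _repair_bad_row
-- ===== SOURCE A (Python) =====
-- PARSE_ERROR_TOKEN = "[parse error]"
--
-- _RECOVER_TEXT_COLUMNS = {"llm_error", "narrative", "outcome_desc"}
--
-- def _repair_bad_row(fields: list[str], headers: list[str]) -> list[str]:
--     """Return ``fields`` padded to ``headers`` while flagging parse issues."""
--
--     expected = len(headers)
--     if expected == 0:
--         return list(fields)
--     result = [PARSE_ERROR_TOKEN] * expected
--     total_fields = len(fields)
--     pointer = 0
--     idx = 0
--     while idx < expected and pointer < total_fields: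
--         column = headers[idx]
--         remaining_cols = expected - idx
--         remaining_fields = total_fields - pointer
--         if column in _RECOVER_TEXT_COLUMNS and remaining_fields > remaining_cols:
--             tail_cols = expected - idx - 1
--             value_end = total_fields - tail_cols
--             if value_end <= pointer:
--                 value_end = pointer + 1
--             value_parts = fields[pointer:value_end]
--             recovered = ",".join(value_parts).strip()
--             result[idx] = (
--                 f"{PARSE_ERROR_TOKEN}: {recovered}"
--                 if recovered
--                 else PARSE_ERROR_TOKEN
--             )
--             pointer = value_end
--         else:
--             result[idx] = fields[pointer]
--             pointer += 1
--         idx += 1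
--     while idx < expected and pointer < total_fields:
--         result[idx] = fields[pointer]
--         pointer += 1
--         idx += 1
--     return result
-- ===== SOURCE B (Python) =====
-- PARSE_ERROR_TOKEN = "[parse error]"
--
-- _RECOVER_TEXT_COLUMNS = {"llm_error", "narrative", "outcome_desc"}
--
--
-- def _first_recover_index(headers):
--     for i, h in enumerate(headers):
--         if h in _RECOVER_TEXT_COLUMNS:
--             return i
--     return None
--
--
-- def _repair_bad_row(fields: list[str], headers: list[str]) -> list[str]:
--     """Pad/align fields to headers, absorbing any overflow into the first
--     recoverable text column — built by slicing and concatenation instead of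
--     an index-mutating while loop."""
--     n = len(headers)
--     if n == 0:
--         return list(fields)
--     overflow = len(fields) - n
--     if overflow <= 0:
--         return fields + [PARSE_ERROR_TOKEN] * (n - len(fields))
--     j = _first_recover_index(headers)
--     if j is None:
--         return fields[:n]
--     recovered = ",".join(fields[j:j + overflow + 1]).strip()
--     middle = f"{PARSE_ERROR_TOKEN}: {recovered}" if recovered else PARSE_ERROR_TOKEN
--     return fields[:j] + [middle] + fields[j + overflow + 1:]
-- ===== Notes on version B (the rewrite author's own statement) =====
-- stated objective: simpler
-- what changed: Replaces A's index-mutating while loop (idx/pointer cursors with a per-iteration absorb decision) by one precomputed overflow branch: pad with tokens when overflow <= 0, else find the first recoverable column once and rebuild the row by slicing and concatenation.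
import Mathlib
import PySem

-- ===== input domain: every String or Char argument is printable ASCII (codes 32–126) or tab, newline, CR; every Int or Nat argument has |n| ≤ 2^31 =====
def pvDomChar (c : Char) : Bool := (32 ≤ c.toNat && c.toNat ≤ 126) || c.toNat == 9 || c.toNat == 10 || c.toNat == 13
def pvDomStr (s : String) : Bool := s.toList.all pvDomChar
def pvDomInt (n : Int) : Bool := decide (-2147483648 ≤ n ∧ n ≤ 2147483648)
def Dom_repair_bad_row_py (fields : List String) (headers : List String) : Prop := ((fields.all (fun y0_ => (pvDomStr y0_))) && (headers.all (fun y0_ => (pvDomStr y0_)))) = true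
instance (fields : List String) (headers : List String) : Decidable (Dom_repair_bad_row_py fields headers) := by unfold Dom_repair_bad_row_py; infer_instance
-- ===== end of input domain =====

-- B rebuilds the row by one precomputed overflow branch and slicing/concatenation
-- instead of A's index-mutating while loop (objective: simpler).

-- ===== PORT A =====
def pvTok : String := "[parse error]"
def pvRecover : PySem.Set String := PySem.Set.ofList ["llm_error", "narrative", "outcome_desc"]

-- first while loop of A; returns (result, idx, pointer)
def pvLoop1 (fields headers : List String) (expected total : Nat)
    (idx pointer : Nat) (result : List String) : List String × Nat × Nat :=
  if idx < expected ∧ pointer < total then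
    let column := headers.getD idx ""
    let remaining_cols := expected - idx
    let remaining_fields := total - pointer
    if PySem.Set.contains pvRecover column ∧ remaining_cols < remaining_fields then
      let tail_cols := expected - idx - 1
      let value_end0 : Int := (total : Int) - (tail_cols : Int)
      let value_end : Int := if value_end0 ≤ (pointer : Int) then (pointer : Int) + 1 else value_end0
      let value_parts := PySem.List.slice fields (some (pointer : Int)) (some value_end)
      let recovered := PySem.Str.strip (PySem.Str.join "," value_parts)
      let newval := if recovered = "" then pvTok else pvTok ++ ": " ++ recovered
      pvLoop1 fields headers expected total (idx + 1) value_end.toNat (result.set idx newval)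
    else
      pvLoop1 fields headers expected total (idx + 1) (pointer + 1)
        (result.set idx (fields.getD pointer ""))
  else (result, idx, pointer)
termination_by expected - idx

-- second (defensive) while loop of A
def pvLoop2 (fields : List String) (expected total : Nat)
    (idx pointer : Nat) (result : List String) : List String :=
  if idx < expected ∧ pointer < total then
    pvLoop2 fields expected total (idx + 1) (pointer + 1) (result.set idx (fields.getD pointer ""))
  else result
termination_by expected - idx

def repair_bad_row_py (fields : List String) (headers : List String) : List String :=
  let expected := headers.length
  if expected = 0 then fields
  else
    let result := List.replicate expected pvTok
    let total := fields.length
    let s := pvLoop1 fields headers expected total 0 0 result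
    pvLoop2 fields expected total s.2.1 s.2.2 s.1

-- ===== PORT B =====
def pvFirstRecoverIndex (headers : List String) : Option Nat :=
  headers.findIdx? (fun h => PySem.Set.contains pvRecover h)

def repair_bad_row_py_alt (fields : List String) (headers : List String) : List String :=
  let n := headers.length
  if n = 0 then fields
  else
    let overflow : Int := (fields.length : Int) - (n : Int)
    if overflow ≤ 0 then fields ++ List.replicate (n - fields.length) pvTok
    else
      match pvFirstRecoverIndex headers with
      | none => fields.take n
      | some j =>
        let recovered := PySem.Str.strip (PySem.Str.join ","
          (PySem.List.slice fields (some (j : Int)) (some ((j : Int) + overflow + 1))))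
        let middle := if recovered = "" then pvTok else pvTok ++ ": " ++ recovered
        fields.take j ++ [middle] ++ fields.drop (j + overflow.toNat + 1)

-- ===== PRECONDITION & SPEC =====
def Spec_repair_bad_row_py (fields : List String) (headers : List String) (out : List String) : Prop := out = repair_bad_row_py_alt fields headers
instance (fields : List String) (headers : List String) (out : List String) : Decidable (Spec_repair_bad_row_py fields headers out) := by unfold Spec_repair_bad_row_py; infer_instance

-- ===== CLAIM (what is proved, stated in full; the proofs are below) =====
def Claim_equal_repair_bad_row_py : Prop := ∀ (fields : List String) (headers : List String), Dom_repair_bad_row_py fields headers → Spec_repair_bad_row_py fields headers (repair_bad_row_py fields headers)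


-- ===== LEMMAS AND PROOFS =====

theorem pv_take_set (l : List String) (i : Nat) (v : String) (h : i < l.length) :
    (l.set i v).take (i + 1) = l.take i ++ [v] := by
  apply List.ext_getElem
  · simp; omega
  · intro k h1 h2
    simp only [List.getElem_take, List.getElem_set]
    rcases Nat.lt_or_ge k i with hk | hk
    · rw [if_neg (by omega)]
      rw [List.getElem_append_left (by simp; omega)]
      simp [List.getElem_take]
    · have hk' : k = i := by simp at h1; omega
      subst hk'
      rw [if_pos rfl, List.getElem_append_right (by simp)]
      simp

theorem pv_drop_set (l : List String) (i m : Nat) (v : String) (h : i < m) :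
    (l.set i v).drop m = l.drop m := by
  apply List.ext_getElem
  · simp
  · intro k h1 h2
    simp only [List.getElem_drop]
    rw [List.getElem_set_ne (by omega)]

theorem pv_seg_cons (F : List String) (k n : Nat) (h1 : n < k) (h2 : n < F.length) :
    (F.take k).drop n = F.getD n "" :: (F.take k).drop (n + 1) := by
  rw [List.drop_eq_getElem_cons (by simp; omega)]
  congr 1
  rw [List.getElem_take]
  exact (List.getD_eq_getElem F "" h2).symm

-- pure copy regime: once total ≤ expected + off, the recover branch can never fire
theorem pvLoop1_copy (F H : List String) (expected total off m : Nat)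
    (hle : total ≤ expected + off) (hF : total ≤ F.length)
    (hm : m = expected ∨ m + off = total) (hm1 : m ≤ expected) (hm2 : m + off ≤ total) :
    ∀ idx result, idx ≤ m → result.length = expected →
      pvLoop1 F H expected total idx (idx + off) result
        = (result.take idx ++ (F.take (m + off)).drop (idx + off) ++ result.drop m, m, m + off) := by
  suffices hs : ∀ n idx result, m - idx = n → idx ≤ m → result.length = expected →
      pvLoop1 F H expected total idx (idx + off) result
        = (result.take idx ++ (F.take (m + off)).drop (idx + off) ++ result.drop m, m, m + off) by
    intro idx result h1 h2; exact hs (m - idx) idx result rfl h1 h2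
  intro n
  induction n with
  | zero =>
    intro idx result hfuel hidx hlen
    have hidx' : idx = m := by omega
    subst hidx'
    rw [pvLoop1, if_neg (by rcases hm with h | h <;> omega)]
    rw [List.drop_eq_nil_of_le (by simp)]
    simp
  | succ n ih =>
    intro idx result hfuel hidx hlen
    have h1 : idx < m := by omega
    rw [pvLoop1]
    rw [if_pos (⟨by omega, by omega⟩ : idx < expected ∧ idx + off < total)]
    have hcond : ¬ (PySem.Set.contains pvRecover (H.getD idx "") = true ∧
        expected - idx < total - (idx + off)) := fun hc => absurd hc.2 (by omega)
    simp only []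
    rw [if_neg hcond]
    have e : idx + off + 1 = (idx + 1) + off := by omega
    rw [e, ih (idx + 1) _ (by omega) (by omega) (by simp [hlen])]
    have hset : idx < result.length := by omega
    rw [pv_take_set result idx _ hset, pv_drop_set result idx m _ h1,
        pv_seg_cons F (m + off) (idx + off) (by omega) (by omega)]
    simp
    omega

-- no recoverable header from idx on: plain one-to-one copy up to expected
theorem pvLoop1_norec (F H : List String) (expected total : Nat)
    (hlt : expected ≤ total) (hF : total ≤ F.length) :
    ∀ idx result, idx ≤ expected → result.length = expected →
      (∀ i, idx ≤ i → i < expected → PySem.Set.contains pvRecover (H.getD i "") = false) →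
      pvLoop1 F H expected total idx idx result
        = (result.take idx ++ (F.take expected).drop idx ++ result.drop expected, expected, expected) := by
  suffices hs : ∀ n idx result, expected - idx = n → idx ≤ expected → result.length = expected →
      (∀ i, idx ≤ i → i < expected → PySem.Set.contains pvRecover (H.getD i "") = false) →
      pvLoop1 F H expected total idx idx result
        = (result.take idx ++ (F.take expected).drop idx ++ result.drop expected, expected, expected) by
    intro idx result h1 h2 h3; exact hs (expected - idx) idx result rfl h1 h2 h3
  intro n
  induction n with
  | zero =>
    intro idx result hfuel hidx hlen hnr
    have hidx' : idx = expected := by omega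
    subst hidx'
    rw [pvLoop1, if_neg (by omega)]
    rw [List.drop_eq_nil_of_le (by simp)]
    simp
  | succ n ih =>
    intro idx result hfuel hidx hlen hnr
    have h1 : idx < expected := by omega
    rw [pvLoop1]
    rw [if_pos (⟨by omega, by omega⟩ : idx < expected ∧ idx < total)]
    have hcond : ¬ (PySem.Set.contains pvRecover (H.getD idx "") = true ∧
        expected - idx < total - idx) := fun hc => by
      have := hnr idx (le_refl idx) h1
      rw [this] at hc
      exact absurd hc.1 (by simp)
    simp only []
    rw [if_neg hcond]
    rw [ih (idx + 1) _ (by omega) (by omega) (by simp [hlen])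
        (fun i hi1 hi2 => hnr i (by omega) hi2)]
    have hset : idx < result.length := by omega
    rw [pv_take_set result idx _ hset, pv_drop_set result idx expected _ h1,
        pv_seg_cons F expected idx (by omega) (by omega)]
    simp

-- overflow regime with first recoverable header at j: one absorption, then pure copy
theorem pvLoop1_rec (F H : List String) (expected total j : Nat)
    (hov : expected < total) (hF : total = F.length) (hj : j < expected)
    (hrec : PySem.Set.contains pvRecover (H.getD j "") = true) :
    ∀ idx result, idx ≤ j → result.length = expected →
      (∀ i, idx ≤ i → i < j → PySem.Set.contains pvRecover (H.getD i "") = false) →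
      pvLoop1 F H expected total idx idx result
        = (result.take idx ++ (F.take j).drop idx
            ++ [(if (PySem.Str.strip (PySem.Str.join ","
                  (PySem.List.slice F (some (j : Int)) (some ((j : Int) + ((total : Int) - (expected : Int)) + 1))))) = ""
                then pvTok
                else pvTok ++ ": " ++ (PySem.Str.strip (PySem.Str.join ","
                  (PySem.List.slice F (some (j : Int)) (some ((j : Int) + ((total : Int) - (expected : Int)) + 1))))))]
            ++ F.drop (j + (total - expected) + 1), expected, expected + (total - expected)) := by
  suffices hs : ∀ n idx result, j - idx = n → idx ≤ j → result.length = expected →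
      (∀ i, idx ≤ i → i < j → PySem.Set.contains pvRecover (H.getD i "") = false) →
      pvLoop1 F H expected total idx idx result
        = (result.take idx ++ (F.take j).drop idx
            ++ [(if (PySem.Str.strip (PySem.Str.join ","
                  (PySem.List.slice F (some (j : Int)) (some ((j : Int) + ((total : Int) - (expected : Int)) + 1))))) = ""
                then pvTok
                else pvTok ++ ": " ++ (PySem.Str.strip (PySem.Str.join ","
                  (PySem.List.slice F (some (j : Int)) (some ((j : Int) + ((total : Int) - (expected : Int)) + 1))))))]
            ++ F.drop (j + (total - expected) + 1), expected, expected + (total - expected)) by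
    intro idx result h1 h2 h3; exact hs (j - idx) idx result rfl h1 h2 h3
  intro n
  induction n with
  | zero =>
    intro idx result hfuel hidx hlen hnr
    have hidx' : idx = j := by omega
    subst hidx'
    rw [pvLoop1]
    rw [if_pos (⟨by omega, by omega⟩ : idx < expected ∧ idx < total)]
    simp only []
    rw [if_pos (⟨hrec, by omega⟩ : PySem.Set.contains pvRecover (H.getD idx "") = true ∧
        expected - idx < total - idx)]
    have hend : ¬ ((total : Int) - ((expected - idx - 1 : Nat) : Int) ≤ (idx : Int)) := by omega
    rw [if_neg hend]
    have hve : ((total : Int) - ((expected - idx - 1 : Nat) : Int)) =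
        (idx : Int) + ((total : Int) - (expected : Int)) + 1 := by omega
    rw [hve]
    have htn : ((idx : Int) + ((total : Int) - (expected : Int)) + 1).toNat
        = (idx + 1) + (total - expected) := by omega
    rw [htn]
    have hset : idx < result.length := by omega
    have hstep : ∀ v : String,
        pvLoop1 F H expected total (idx + 1) (idx + 1 + (total - expected)) (result.set idx v)
          = (result.take idx ++ [v] ++ F.drop (idx + (total - expected) + 1),
             expected, expected + (total - expected)) := by
      intro v
      rw [pvLoop1_copy F H expected total (total - expected) expected (by omega) (by omega)
          (Or.inl rfl) (le_refl _) (by omega) (idx + 1) (result.set idx v) (by omega)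
          (by simp [hlen])]
      rw [pv_take_set result idx v hset]
      rw [pv_drop_set result idx expected v (by omega)]
      rw [List.drop_eq_nil_of_le (by omega : result.length ≤ expected)]
      rw [List.take_of_length_le (by omega : F.length ≤ expected + (total - expected))]
      rw [show idx + 1 + (total - expected) = idx + (total - expected) + 1 from by omega]
      try simp
    rw [hstep]
    rw [List.drop_eq_nil_of_le (show (F.take idx).length ≤ idx from by simp)]
    simp
  | succ n ih =>
    intro idx result hfuel hidx hlen hnr
    have h1 : idx < j := by omega
    rw [pvLoop1]
    rw [if_pos (⟨by omega, by omega⟩ : idx < expected ∧ idx < total)]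
    have hcond : ¬ (PySem.Set.contains pvRecover (H.getD idx "") = true ∧
        expected - idx < total - idx) := fun hc => by
      have := hnr idx (le_refl idx) h1
      rw [this] at hc
      exact absurd hc.1 (by simp)
    simp only []
    rw [if_neg hcond]
    rw [ih (idx + 1) _ (by omega) (by omega) (by simp [hlen])
        (fun i hi1 hi2 => hnr i (by omega) hi2)]
    have hset : idx < result.length := by omega
    rw [pv_take_set result idx _ hset,
        pv_seg_cons F j idx (by omega) (by omega)]
    simp

-- ===== VERDICT (by name: the statement is the Claim_ definition above) =====
theorem repair_bad_row_py_spec : Claim_equal_repair_bad_row_py := by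
  unfold Claim_equal_repair_bad_row_py
  intro fields headers _
  unfold Spec_repair_bad_row_py repair_bad_row_py repair_bad_row_py_alt
  by_cases h0 : headers.length = 0
  · simp [h0]
  · simp only [if_neg h0]
    by_cases hov : fields.length ≤ headers.length
    · -- no overflow: plain copy then pad
      have hc := pvLoop1_copy fields headers headers.length fields.length 0 fields.length
        (by omega) (le_refl _) (Or.inr (by omega)) hov (by omega)
        0 (List.replicate headers.length pvTok) (by omega) (by simp)
      simp only [Nat.add_zero] at hc
      rw [hc]
      dsimp only
      rw [pvLoop2, if_neg (by omega)]
      rw [if_pos (by omega : (fields.length : Int) - (headers.length : Int) ≤ 0)]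
      simp [List.take_length, List.drop_replicate]
    · rw [if_neg (by omega : ¬ ((fields.length : Int) - (headers.length : Int) ≤ 0))]
      rcases hfi : pvFirstRecoverIndex headers with _ | j
      · -- no recoverable column at all
        have hnone := List.findIdx?_eq_none_iff.mp hfi
        have hnr : ∀ i, 0 ≤ i → i < headers.length →
            PySem.Set.contains pvRecover (headers.getD i "") = false := by
          intro i _ hi
          rw [List.getD_eq_getElem headers "" hi]
          exact hnone _ (List.getElem_mem hi)
        have hc := pvLoop1_norec fields headers headers.length fields.length
          (by omega) (le_refl _) 0 (List.replicate headers.length pvTok)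
          (by omega) (by simp) hnr
        rw [hc]
        dsimp only
        rw [pvLoop2, if_neg (by omega)]
        simp [List.drop_replicate]
      · -- first recoverable column at j
        obtain ⟨hjlen, hpj, hprior⟩ := List.findIdx?_eq_some_iff_getElem.mp hfi
        have hrec : PySem.Set.contains pvRecover (headers.getD j "") = true := by
          rw [List.getD_eq_getElem headers "" hjlen]; exact hpj
        have hnr : ∀ i, 0 ≤ i → i < j →
            PySem.Set.contains pvRecover (headers.getD i "") = false := by
          intro i _ hi
          rw [List.getD_eq_getElem headers "" (by omega)]
          simpa using hprior i hi
        have hc := pvLoop1_rec fields headers headers.length fields.length j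
          (by omega) rfl hjlen hrec 0 (List.replicate headers.length pvTok)
          (by omega) (by simp) hnr
        rw [hc]
        dsimp only
        rw [pvLoop2, if_neg (by omega)]
        have htn : ((fields.length : Int) - (headers.length : Int)).toNat
            = fields.length - headers.length := by omega
        simp [htn]
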